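-- pv_equiv track=rewrite | github.com/greenspangle/LIN7077_Humanities | assignments/a3_collections_iteration/retired/a3_answers_old.py | robber_lingo
-- ===== SOURCE A (Python) =====
-- def robber_lingo(a_str):
--     """Translate a_str text into 'rövarspråket'
--     (Swedish for “robber’s language”).
--     That is, double every consonant and place an occurrence of 'o' in between.
--     For example, robber_lingo('this is fun') should return the string
--     'tothohisos isos fofunon'.
--     """
--     # Example in problem statement is all lower-case and
--     # statement says nothing about upper case.
--     # Assume therefore that uppercase is just copied verbatim into the result
--     #
--     # create a list to build result in
--     robber_lst = []
--     # consonants are characters that are not vowels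
--     consonants = set('abcdefghijklmnopqrstuvwxyz') - set('aeiou')
--     # iterate through string
--     # testing for consonants and constructing result as we go.
--     for char in a_str:
--         # all characters in a_str are retained in translated text
--         robber_lst.append(char)
--         if char in consonants:
--             # consonants are repeated with an 'o' between them
--             robber_lst.append('o')
--             robber_lst.append(char)
--     # All input string processed. Assemble result into a string and return it
--     result = ''.join(robber_lst)
--     return result
-- ===== SOURCE B (Python) =====
-- import re
--
-- def robber_lingo(a_str):
--     return re.sub(r'[bcdfghjklmnpqrstvwxyz]', lambda m: m.group(0) + 'o' + m.group(0), a_str)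
-- ===== Notes on version B (the rewrite author's own statement) =====
-- stated objective: idiomatic
-- what changed: Replaced the explicit per-character loop with list accumulator and set-difference membership test by a single re.sub over the literal consonant character class with a replacement function.
import Mathlib
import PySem

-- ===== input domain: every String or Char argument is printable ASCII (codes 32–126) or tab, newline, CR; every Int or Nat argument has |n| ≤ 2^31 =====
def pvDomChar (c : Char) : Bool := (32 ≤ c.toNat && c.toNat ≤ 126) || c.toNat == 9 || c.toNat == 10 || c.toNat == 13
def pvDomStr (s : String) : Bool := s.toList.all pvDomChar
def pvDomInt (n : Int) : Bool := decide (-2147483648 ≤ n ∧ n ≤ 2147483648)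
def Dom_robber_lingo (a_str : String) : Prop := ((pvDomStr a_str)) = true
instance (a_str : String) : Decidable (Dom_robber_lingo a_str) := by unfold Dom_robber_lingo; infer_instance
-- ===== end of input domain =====

-- B replaces A's explicit loop/accumulator by a regex substitution over the literal consonant class (idiomatic; same cost).

-- ===== PORT A =====
def robber_lingo (a_str : String) : String :=
  -- consonants = set('abcdefghijklmnopqrstuvwxyz') - set('aeiou')
  let consonants : PySem.Set Char :=
    PySem.Set.diff (PySem.Set.ofList "abcdefghijklmnopqrstuvwxyz".toList)
                   (PySem.Set.ofList "aeiou".toList)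
  -- for char in a_str: append char; if consonant, append 'o' and char again
  let robber_lst : List Char := a_str.toList.foldl
    (fun acc c =>
      let acc := acc ++ [c]
      if PySem.Set.contains consonants c then acc ++ ['o', c] else acc) []
  String.mk robber_lst

-- ===== PORT B =====
-- re.sub(r'[bcdfghjklmnpqrstvwxyz]', m -> m+'o'+m, s): the engine scans the string once,
-- rewriting each class match c to c'o'c and copying everything else; ported as flatMap.
def bConsClass : List Char := "bcdfghjklmnpqrstvwxyz".toList

def robber_lingo_alt (a_str : String) : String :=
  String.mk (a_str.toList.flatMap (fun c => if bConsClass.contains c then [c, 'o', c] else [c]))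

-- ===== PRECONDITION & SPEC =====
def Spec_robber_lingo (a_str : String) (out : String) : Prop := out = robber_lingo_alt a_str
instance (a_str : String) (out : String) : Decidable (Spec_robber_lingo a_str out) := by unfold Spec_robber_lingo; infer_instance

-- ===== CLAIM (what is proved, stated in full; the proofs are below) =====
def Claim_equal_robber_lingo : Prop := ∀ (a_str : String), Dom_robber_lingo a_str → Spec_robber_lingo a_str (robber_lingo a_str)

-- ===== LEMMAS AND PROOFS =====

-- the set difference A computes is (as a list of distinct elements, in order) exactly B's class
theorem consonants_eq :
    PySem.Set.diff (PySem.Set.ofList "abcdefghijklmnopqrstuvwxyz".toList)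
                   (PySem.Set.ofList "aeiou".toList) = bConsClass := by decide

theorem foldl_eq_flatMap (f : Char → Bool) (l : List Char) (acc : List Char) :
    l.foldl (fun acc c => let acc := acc ++ [c]; if f c then acc ++ ['o', c] else acc) acc
      = acc ++ l.flatMap (fun c => if f c then [c, 'o', c] else [c]) := by
  induction l generalizing acc with
  | nil => simp
  | cons c t ih =>
    simp only [List.foldl_cons, List.flatMap_cons, ih]
    by_cases h : f c <;> simp [h]

-- ===== VERDICT (by name: the statement is the Claim_ definition above) =====
theorem robber_lingo_spec : Claim_equal_robber_lingo := by
  intro a_str _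
  show _ = _
  unfold robber_lingo robber_lingo_alt
  simp only [consonants_eq]
  rw [foldl_eq_flatMap (fun c => PySem.Set.contains bConsClass c)]
  simp [PySem.Set.contains]
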